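-- pv_equiv track=rewrite | github.com/kycasp/AdventOfCode2024 | day2/day2.py | is_increasing
-- ===== SOURCE A (Python) =====
-- def is_increasing(report, bad_level):
-- 	for i in range (1,len(report)):
-- 		if report[i-1] > report[i] or 1 > abs(report[i] - report[i-1]) or abs(report[i] - report[i-1]) > 3:
-- 			if bad_level > 0:
-- 				return False
-- 			if i+1 < len(report):
-- 				if report[i-1] > report[i+1] or 1 > abs(report[i-1] - report[i+1]) or abs(report[i-1] - report[i+1]) > 3:
-- 					return is_increasing(report[:i-1] + report[i:], 1)
-- 				else:
-- 					return is_increasing(report[:i] + report[i+1:], 1)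
-- 	return True
-- ===== SOURCE B (Python) =====
-- def is_increasing(report, bad_level):
--     # Collect ALL violating adjacent-pair indices in one pass, then answer by
--     # arithmetic on that index list: removing element d fixes the report iff
--     # every violation touches d and the new bridge pair (d-1, d+1) is fine.
--     # No modified list is ever built and the data is never rescanned.
--     n = len(report)
--     bad = [i for i in range(1, n) if not 1 <= report[i] - report[i-1] <= 3]
--     if not bad:
--         return True
--     if bad_level > 0:
--         return False
--     i = bad[0]
--     if i + 1 == n:
--         return True
--     d = i if 1 <= report[i+1] - report[i-1] <= 3 else i - 1
--     bridge_ok = d == 0 or d == n - 1 or 1 <= report[d+1] - report[d-1] <= 3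
--     return bridge_ok and all(j == d or j == d + 1 for j in bad)
-- ===== Notes on version B (the rewrite author's own statement) =====
-- stated objective: alternative
-- what changed: A scans and, at the first bad pair, recurses on a sliced copy of the list with bad_level=1 to rescan it; B instead collects the complete list of violating pair indices in one comprehension and decides the outcome purely by arithmetic on that index list (removal of element d fixes the report iff every violation touches d and the bridge pair around d is fine), never building a modified list or rescanning the data.
import Mathlib
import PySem

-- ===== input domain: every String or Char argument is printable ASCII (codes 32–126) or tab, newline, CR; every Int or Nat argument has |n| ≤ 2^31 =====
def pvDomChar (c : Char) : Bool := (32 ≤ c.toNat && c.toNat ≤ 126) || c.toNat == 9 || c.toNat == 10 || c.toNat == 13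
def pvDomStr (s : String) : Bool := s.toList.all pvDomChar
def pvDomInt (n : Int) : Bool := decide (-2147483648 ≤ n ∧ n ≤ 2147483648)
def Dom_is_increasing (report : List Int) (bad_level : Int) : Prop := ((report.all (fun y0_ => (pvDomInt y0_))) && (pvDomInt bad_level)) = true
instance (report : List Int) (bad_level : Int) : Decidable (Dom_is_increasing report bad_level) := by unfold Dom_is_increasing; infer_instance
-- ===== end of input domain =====

-- B collects all violating pair indices in one pass and answers by arithmetic on that
-- index list (removing element d fixes the report iff every violation touches d and the
-- bridge pair is fine), never building a modified list or rescanning it.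

-- ===== PORT A =====
-- A's for-loop over i = 1 .. len-1 with early returns, as index recursion; Python's loop
-- index i is represented as k+1 (k starts at 0), so report[i-1]/report[i]/report[i+1] are
-- getD k / getD (k+1) / getD (k+2).  The recursive Python call is_increasing(shorter, 1)
-- becomes the call with k restarted at 0.  All reads are in range, so getD 0 is exact.
def isIncA (report : List Int) (bad_level : Int) (k : Nat) : Bool :=
  if _h : k + 1 < report.length then
    if report.getD k 0 > report.getD (k+1) 0
        ∨ 1 > (report.getD (k+1) 0 - report.getD k 0).natAbs
        ∨ (report.getD (k+1) 0 - report.getD k 0).natAbs > 3 then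
      if bad_level > 0 then false
      else if _h2 : k + 2 < report.length then
        if report.getD k 0 > report.getD (k+2) 0
            ∨ 1 > (report.getD k 0 - report.getD (k+2) 0).natAbs
            ∨ (report.getD k 0 - report.getD (k+2) 0).natAbs > 3 then
          isIncA (report.take k ++ report.drop (k+1)) 1 0
        else
          isIncA (report.take (k+1) ++ report.drop (k+2)) 1 0
      else isIncA report bad_level (k+1)
    else isIncA report bad_level (k+1)
  else true
termination_by (report.length, report.length - k)
decreasing_by
  · apply Prod.Lex.left
    have ht : (report.take k).length ≤ k := by simp
    rw [List.length_append, List.length_drop]; omega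
  · apply Prod.Lex.left
    have ht : (report.take (k+1)).length ≤ k+1 := by simp
    rw [List.length_append, List.length_drop]; omega
  · apply Prod.Lex.right; omega
  · apply Prod.Lex.right; omega

def is_increasing (report : List Int) (bad_level : Int) : Bool := isIncA report bad_level 0

-- ===== PORT B =====
def okPair (a b : Int) : Bool := decide (1 ≤ b - a) && decide (b - a ≤ 3)

-- bad = [i for i in range(1, n) if not 1 <= report[i] - report[i-1] <= 3]
def badIdxs (report : List Int) : List Nat :=
  (List.range' 1 (report.length - 1)).filter
    (fun i => !okPair (report.getD (i-1) 0) (report.getD i 0))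

def is_increasing_alt (report : List Int) (bad_level : Int) : Bool :=
  match badIdxs report with
  | [] => true
  | bad@(i :: _) =>
    if bad_level > 0 then false
    else if i + 1 = report.length then true
    else
      let d := if okPair (report.getD (i-1) 0) (report.getD (i+1) 0) then i else i - 1
      ((decide (d = 0) || decide (d = report.length - 1)
          || okPair (report.getD (d-1) 0) (report.getD (d+1) 0))
        && bad.all (fun j => decide (j = d) || decide (j = d + 1)))

-- ===== PRECONDITION & SPEC =====
def Spec_is_increasing (report : List Int) (bad_level : Int) (out : Bool) : Prop := out = is_increasing_alt report bad_level
instance (report : List Int) (bad_level : Int) (out : Bool) : Decidable (Spec_is_increasing report bad_level out) := by unfold Spec_is_increasing; infer_instance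

-- ===== CLAIM (what is proved, stated in full; the proofs are below) =====
def Claim_equal_is_increasing : Prop := ∀ (report : List Int) (bad_level : Int), Dom_is_increasing report bad_level → Spec_is_increasing report bad_level (is_increasing report bad_level)

-- ===== LEMMAS AND PROOFS =====

theorem bool_true_of_ne_false {b : Bool} (h : ¬ b = false) : b = true := by
  cases b
  · exact absurd rfl h
  · rfl

-- A's bad-pair test is the negation of B's okPair.
theorem badA_iff (a b : Int) :
    (a > b ∨ 1 > (b - a).natAbs ∨ (b - a).natAbs > 3) ↔ okPair a b = false := by
  simp only [okPair, Bool.and_eq_false_iff, decide_eq_false_iff_not, not_le]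
  omega

theorem badA_inner_iff (a b : Int) :
    (a > b ∨ 1 > (a - b).natAbs ∨ (a - b).natAbs > 3) ↔ okPair a b = false := by
  simp only [okPair, Bool.and_eq_false_iff, decide_eq_false_iff_not, not_le]
  omega

-- full pairwise validity of a list
def validAll (r : List Int) : Bool :=
  (List.range' 1 (r.length - 1)).all (fun j => okPair (r.getD (j-1) 0) (r.getD j 0))

-- A's behaviour after the first bad pair at index j (used to characterize A's scan).
def handleBad (r : List Int) (bl : Int) (j : Nat) : Bool :=
  if bl > 0 then false
  else if j + 1 = r.length then true
  else
    let d := if okPair (r.getD (j-1) 0) (r.getD (j+1) 0) then j else j - 1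
    validAll (r.take d ++ r.drop (d+1))

-- With bad_level = 1, A's scan from k is exactly the all-pairs check from index k+1.
theorem isIncA_one (r : List Int) (k : Nat) :
    isIncA r 1 k =
      (List.range' (k+1) (r.length - (k+1))).all
        (fun j => okPair (r.getD (j-1) 0) (r.getD j 0)) := by
  by_cases h : k + 1 < r.length
  · have hr : r.length - (k+1) = (r.length - (k+2)) + 1 := by omega
    rw [isIncA, dif_pos h, hr, List.range'_succ]
    simp only [List.all_cons, Nat.add_sub_cancel]
    by_cases hb : okPair (r.getD k 0) (r.getD (k+1) 0) = false
    · rw [if_pos ((badA_iff _ _).mpr hb), if_pos (show (1:Int) > 0 by norm_num), hb,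
        Bool.false_and]
    · have hb' : okPair (r.getD k 0) (r.getD (k+1) 0) = true :=
        bool_true_of_ne_false hb
      rw [if_neg (fun hc => hb ((badA_iff _ _).mp hc)), hb', Bool.true_and,
        isIncA_one r (k+1)]
  · rw [isIncA, dif_neg h, show r.length - (k+1) = 0 from by omega]
    simp
termination_by r.length - k
decreasing_by omega

-- A's scan with bad_level = 1 restarted at 0 is exactly the full validity check.
theorem isIncA_validAll (r : List Int) : isIncA r 1 0 = validAll r := by
  rw [isIncA_one, validAll]

-- A's scan from k equals: find the first bad pair at index j ≥ k+1, then handleBad.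
theorem isIncA_scan (r : List Int) (bl : Int) (k : Nat) :
    isIncA r bl k =
      (match (List.range' (k+1) (r.length - (k+1))).find?
          (fun j => !okPair (r.getD (j-1) 0) (r.getD j 0)) with
       | none => true
       | some j => handleBad r bl j) := by
  by_cases h : k + 1 < r.length
  · have hr : r.length - (k+1) = (r.length - (k+2)) + 1 := by omega
    rw [isIncA, dif_pos h, hr, List.range'_succ]
    by_cases hb : okPair (r.getD k 0) (r.getD (k+1) 0) = false
    · rw [if_pos ((badA_iff _ _).mpr hb)]
      simp only [List.find?_cons, Nat.add_sub_cancel, hb, Bool.not_false]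
      simp only [handleBad, Nat.add_sub_cancel, show k+1+1 = k+2 from rfl]
      by_cases hbl : bl > 0
      · rw [if_pos hbl, if_pos hbl]
      · rw [if_neg hbl, if_neg hbl]
        by_cases h2 : k + 2 < r.length
        · rw [dif_pos h2, if_neg (show ¬ (k + 2 = r.length) from by omega)]
          by_cases hin : okPair (r.getD k 0) (r.getD (k+2) 0) = false
          · rw [if_pos ((badA_inner_iff _ _).mpr hin),
              if_neg (show ¬ (okPair (r.getD k 0) (r.getD (k+2) 0) = true) from by
                rw [hin]; decide),
              isIncA_validAll]
          · have hin' : okPair (r.getD k 0) (r.getD (k+2) 0) = true :=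
              bool_true_of_ne_false hin
            rw [if_neg (fun hc => hin ((badA_inner_iff _ _).mp hc)), if_pos hin',
              isIncA_validAll]
        · rw [dif_neg h2, if_pos (show k + 2 = r.length from by omega), isIncA,
            dif_neg (show ¬ (k + 1 + 1 < r.length) from h2)]
    · have hb' : okPair (r.getD k 0) (r.getD (k+1) 0) = true :=
        bool_true_of_ne_false hb
      rw [if_neg (fun hc => hb ((badA_iff _ _).mp hc))]
      simp only [List.find?_cons, Nat.add_sub_cancel, hb', Bool.not_true]
      exact isIncA_scan r bl (k+1)
  · rw [isIncA, dif_neg h, show r.length - (k+1) = 0 from by omega]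
    simp
termination_by r.length - k
decreasing_by omega

-- find? is the head of the filtered list.
theorem find?_eq_head?_filter {α : Type} (p : α → Bool) (l : List α) :
    l.find? p = (l.filter p).head? := by
  induction l with
  | nil => rfl
  | cons a t ih =>
    rw [List.find?_cons, List.filter_cons]
    cases h : p a
    · rw [ih]; simp
    · simp

-- "every element satisfies p or q" = "every p-violator satisfies q"
theorem all_or_eq_filter_all {α : Type} (p q : α → Bool) (l : List α) :
    l.all (fun x => p x || q x) = (l.filter (fun x => !p x)).all q := by
  induction l with
  | nil => rfl
  | cons a t ih =>
    rw [List.all_cons, List.filter_cons]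
    cases h : p a
    · rw [Bool.false_or, Bool.not_false, if_pos rfl, List.all_cons, ih]
    · rw [Bool.true_or, Bool.true_and, Bool.not_true,
        if_neg (show ¬ (false = true) from by simp), ih]

-- element access in the list with index d removed
theorem getD_remove (r : List Int) (d k : Nat) (hk : k < r.length - 1) :
    (r.take d ++ r.drop (d+1)).getD k 0 = if k < d then r.getD k 0 else r.getD (k+1) 0 := by
  by_cases h : k < d
  · rw [if_pos h]
    rcases Nat.lt_or_ge d r.length with hd | hd
    · rw [List.getD_append (h := by rw [List.length_take]; omega),
        List.getD_eq_getElem?_getD, List.getD_eq_getElem?_getD,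
        List.getElem?_take_of_lt h]
    · rw [List.take_of_length_le (by omega), List.drop_of_length_le (by omega),
        List.append_nil]
  · rw [if_neg h]
    have hd : d < r.length := by omega
    rw [List.getD_eq_getElem?_getD, List.getD_eq_getElem?_getD,
      List.getElem?_append_right (by rw [List.length_take]; omega),
      List.length_take, List.getElem?_drop]
    congr 2
    omega

-- Removing element d (with d+1 < length) leaves a valid list iff the bridge pair around d
-- is fine and every violating pair index touches d.
theorem validAll_remove (r : List Int) (d : Nat) (hd : d + 1 < r.length) :
    validAll (r.take d ++ r.drop (d+1)) =
      ((decide (d = 0) || okPair (r.getD (d-1) 0) (r.getD (d+1) 0))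
        && (List.range' 1 (r.length - 1)).all
            (fun j => okPair (r.getD (j-1) 0) (r.getD j 0)
              || (decide (j = d) || decide (j = d + 1)))) := by
  have hlen : (r.take d ++ r.drop (d+1)).length = r.length - 1 := by
    rw [List.length_append, List.length_take, List.length_drop]; omega
  rw [Bool.eq_iff_iff, validAll, hlen, Bool.and_eq_true, List.all_eq_true, List.all_eq_true]
  constructor
  · intro H
    constructor
    · rcases Nat.eq_zero_or_pos d with h0 | h0
      · simp [h0]
      · have hm := H d (by rw [List.mem_range'_1]; omega)
        rw [getD_remove r d (d-1) (by omega), getD_remove r d d (by omega),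
          if_pos (show d - 1 < d from by omega), if_neg (show ¬ d < d from by omega)] at hm
        simp only [Bool.or_eq_true]
        exact Or.inr hm
    · intro j hj
      rw [List.mem_range'_1] at hj
      simp only [Bool.or_eq_true, decide_eq_true_eq]
      by_cases hjd : j = d ∨ j = d + 1
      · exact Or.inr hjd
      · rw [not_or] at hjd
        by_cases hlt : j < d
        · have hm := H j (by rw [List.mem_range'_1]; omega)
          rw [getD_remove r d (j-1) (by omega), getD_remove r d j (by omega),
            if_pos (show j - 1 < d from by omega), if_pos hlt] at hm
          exact Or.inl hm
        · have hj2 : j ≥ d + 2 := by omega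
          have hm := H (j-1) (by rw [List.mem_range'_1]; omega)
          rw [getD_remove r d (j-1-1) (by omega), getD_remove r d (j-1) (by omega),
            if_neg (show ¬ j - 1 - 1 < d from by omega),
            if_neg (show ¬ j - 1 < d from by omega),
            show j - 1 - 1 + 1 = j - 1 from by omega,
            show j - 1 + 1 = j from by omega] at hm
          exact Or.inl hm
  · rintro ⟨hbr, H⟩ k hk
    rw [List.mem_range'_1] at hk
    rw [getD_remove r d (k-1) (by omega), getD_remove r d k (by omega)]
    by_cases hlt : k < d
    · rw [if_pos (show k - 1 < d from by omega), if_pos hlt]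
      have hm := H k (by rw [List.mem_range'_1]; omega)
      simp only [Bool.or_eq_true, decide_eq_true_eq] at hm
      rcases hm with h | h | h
      · exact h
      · omega
      · omega
    · by_cases hkd : k = d
      · rw [if_pos (show k - 1 < d from by omega), if_neg (show ¬ k < d from hlt)]
        have hd0 : ¬ d = 0 := by omega
        simp only [hd0, decide_false, Bool.false_or] at hbr
        rw [show k - 1 = d - 1 from by omega, hkd]
        exact hbr
      · rw [if_neg (show ¬ k - 1 < d from by omega), if_neg (show ¬ k < d from hlt),
          show k - 1 + 1 = k from by omega]
        have hm := H (k+1) (by rw [List.mem_range'_1]; omega)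
        simp only [Bool.or_eq_true, decide_eq_true_eq] at hm
        rcases hm with h | h | h
        · exact h
        · omega
        · omega

-- B's match on a nonempty bad list, spelled out.
theorem alt_cons (r : List Int) (bl : Int) (i : Nat) (t : List Nat)
    (hb : badIdxs r = i :: t) :
    is_increasing_alt r bl =
      (if bl > 0 then false
       else if i + 1 = r.length then true
       else
         let d := if okPair (r.getD (i-1) 0) (r.getD (i+1) 0) then i else i - 1
         ((decide (d = 0) || decide (d = r.length - 1)
             || okPair (r.getD (d-1) 0) (r.getD (d+1) 0))
           && (i :: t).all (fun j => decide (j = d) || decide (j = d + 1)))) := by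
  unfold is_increasing_alt
  rw [hb]

-- the head of the filtered range is in the range
theorem head_filter_mem {α : Type} (p : α → Bool) (l : List α) (a : α) (t : List α)
    (h : l.filter p = a :: t) : a ∈ l := by
  have : a ∈ l.filter p := by rw [h]; exact List.mem_cons_self
  exact (List.mem_filter.mp this).1

-- ===== VERDICT (by name: the statement is the Claim_ definition above) =====
theorem is_increasing_spec : Claim_equal_is_increasing := by
  intro report bad_level _
  unfold Spec_is_increasing is_increasing
  rw [isIncA_scan report bad_level 0]
  have hfe : (List.range' (0+1) (report.length - (0+1))).find?
      (fun j => !okPair (report.getD (j-1) 0) (report.getD j 0))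
      = (badIdxs report).head? := by
    rw [find?_eq_head?_filter]; rfl
  rw [hfe]
  cases hb : badIdxs report with
  | nil =>
    rw [show is_increasing_alt report bad_level = true from by
      unfold is_increasing_alt; rw [hb]]
    rfl
  | cons i t =>
    rw [alt_cons report bad_level i t hb]
    simp only [List.head?_cons]
    have hmem : i ∈ List.range' 1 (report.length - 1) :=
      head_filter_mem _ _ _ _ hb
    rw [List.mem_range'_1] at hmem
    unfold handleBad
    by_cases hbl : bad_level > 0
    · rw [if_pos hbl, if_pos hbl]
    · rw [if_neg hbl, if_neg hbl]
      by_cases hlast : i + 1 = report.length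
      · rw [if_pos hlast, if_pos hlast]
      · rw [if_neg hlast, if_neg hlast]
        have hin : i + 1 < report.length := by omega
        set d := if okPair (report.getD (i-1) 0) (report.getD (i+1) 0) then i else i - 1
          with hdef
        have hdlt : d + 1 < report.length := by
          rw [hdef]; split <;> omega
        rw [validAll_remove report d hdlt]
        have hdn : decide (d = report.length - 1) = false := by
          simp only [decide_eq_false_iff_not]; omega
        rw [hdn, Bool.or_false]
        congr 1
        rw [all_or_eq_filter_all
          (fun j => okPair (report.getD (j-1) 0) (report.getD j 0))
          (fun j => decide (j = d) || decide (j = d + 1))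
          (List.range' 1 (report.length - 1)),
          show (List.range' 1 (report.length - 1)).filter
            (fun j => !okPair (report.getD (j-1) 0) (report.getD j 0)) = i :: t from hb]
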